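-- pv_equiv track=rewrite | github.com/pointel-com-br/www.pointel | public/piarti/aartc.py | adjust_broken
-- ===== SOURCE A (Python) =====
-- def adjust_broken(text):
--     i = 0
--     result = []
--     while i < len(text):
--         line = text[i]
--         test = line.strip()
--         if test != "":
--             if test[-1].islower():
--                 j = i + 1
--                 while j < len(text):
--                     test_next = text[j].strip()
--                     if test_next != "":
--                         if test_next[0].islower():
--                             diff = (j - 1) - i
--                             i += diff
--                         break
--                     j += 1
--         result.append(line)
--         i += 1
--     return result
-- ===== SOURCE B (Python) =====
-- def adjust_broken(text):
--     result = []
--     pending = []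
--     prev_ends_lower = False
--     for line in text:
--         test = line.strip()
--         if test == "":
--             pending.append(line)
--         else:
--             if prev_ends_lower and test[0].islower() and pending:
--                 pending = []
--             else:
--                 result.extend(pending)
--                 pending = []
--             result.append(line)
--             prev_ends_lower = test[-1].islower()
--     result.extend(pending)
--     return result
-- ===== Notes on version B (the rewrite author's own statement) =====
-- stated objective: simpler
-- what changed: Replaces A's index-jumping outer/inner while loops (look-ahead over blank lines with index arithmetic) by a single forward pass that buffers consecutive blank lines and remembers whether the last non-blank line ended in lowercase, deciding at each non-blank line whether to drop or flush the buffer.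
import Mathlib
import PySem

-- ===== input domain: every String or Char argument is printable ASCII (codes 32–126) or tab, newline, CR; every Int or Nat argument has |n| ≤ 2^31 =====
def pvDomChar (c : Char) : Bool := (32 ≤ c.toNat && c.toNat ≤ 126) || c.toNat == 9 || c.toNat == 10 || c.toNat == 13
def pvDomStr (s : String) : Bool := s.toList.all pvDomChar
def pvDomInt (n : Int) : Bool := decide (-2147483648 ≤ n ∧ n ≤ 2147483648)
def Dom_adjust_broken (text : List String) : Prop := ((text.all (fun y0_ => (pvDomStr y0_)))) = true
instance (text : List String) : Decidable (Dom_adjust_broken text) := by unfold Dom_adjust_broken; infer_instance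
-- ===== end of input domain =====

-- B replaces A's index-jumping look-ahead loops by one forward pass that buffers blank lines (simpler decomposition); no argument is mutated, return value only.

-- shared string primitives (exact ports of .strip(), c.islower(); strings handled on the char-list side)
def pvStrip (s : String) : List Char := PySem.Chars.strip s.toList

-- test[0].islower() for a (guarded) non-empty test; false on [] is never reached through the guards
def pvFirstLower : List Char → Bool
  | [] => false
  | c :: _ => PySem.Chars.islower c

-- test[-1].islower() for a (guarded) non-empty test
def pvLastLower (t : List Char) : Bool := (t.getLast?.map PySem.Chars.islower).getD false

-- ===== PORT A =====
-- inner `while j < len(text)` loop of A; returns the final value of i (i + diff on a lowercase hit).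
-- Nat subtraction (j - 1) - i is exact here: A only ever reaches it with j ≥ i + 1.
def innerScan (text : List String) (i j : Nat) : Nat :=
  if h : j < text.length then
    if pvStrip text[j] ≠ [] then
      if pvFirstLower (pvStrip text[j]) then i + ((j - 1) - i) else i
    else innerScan text i (j + 1)
  else i
termination_by text.length - j
decreasing_by omega

-- the inner loop never decreases i (needed for outerLoop's termination)
theorem innerScan_ge (text : List String) (i j : Nat) : i ≤ innerScan text i j := by
  fun_induction innerScan text i j with
  | case1 => omega
  | case2 => omega
  | case3 _ _ _ ih => exact ih
  | case4 => omega

-- outer `while i < len(text)` loop of A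
def outerLoop (text : List String) (i : Nat) (result : List String) : List String :=
  if h : i < text.length then
    outerLoop text
      ((if pvStrip text[i] ≠ [] ∧ pvLastLower (pvStrip text[i]) then innerScan text i (i + 1) else i) + 1)
      (result ++ [text[i]])
  else result
termination_by text.length - i
decreasing_by
  have hle := innerScan_ge text i (i + 1)
  split <;> omega

def adjust_broken (text : List String) : List String := outerLoop text 0 []

-- ===== PORT B =====
-- one step of B's single forward pass; state = (result, pending blank lines, prev non-blank line ended lowercase)
def altStep (st : List String × List String × Bool) (line : String) : List String × List String × Bool :=
  if pvStrip line = [] then (st.1, st.2.1 ++ [line], st.2.2)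
  else if st.2.2 && pvFirstLower (pvStrip line) && !st.2.1.isEmpty then
    (st.1 ++ [line], [], pvLastLower (pvStrip line))
  else (st.1 ++ st.2.1 ++ [line], [], pvLastLower (pvStrip line))

def adjust_broken_alt (text : List String) : List String :=
  let st := text.foldl altStep ([], [], false)
  st.1 ++ st.2.1

-- ===== PRECONDITION & SPEC =====
def Spec_adjust_broken (text : List String) (out : List String) : Prop := out = adjust_broken_alt text
instance (text : List String) (out : List String) : Decidable (Spec_adjust_broken text out) := by unfold Spec_adjust_broken; infer_instance

-- ===== CLAIM (what is proved, stated in full; the proofs are below) =====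
def Claim_equal_adjust_broken : Prop := ∀ (text : List String), Dom_adjust_broken text → Spec_adjust_broken text (adjust_broken text)

-- ===== LEMMAS AND PROOFS =====

-- does the first non-blank line of l (if any) start with a lowercase letter?
def nSL : List String → Bool
  | [] => false
  | l :: rest => if pvStrip l = [] then nSL rest else pvFirstLower (pvStrip l)

-- length of the leading run of blank lines
def blankLen : List String → Nat
  | [] => 0
  | l :: rest => if pvStrip l = [] then blankLen rest + 1 else 0

-- common specification both ports are reduced to: b = "last emitted non-blank line ended lowercase"
def specF : Bool → List String → List String
  | _, [] => []
  | b, l :: rest =>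
    if pvStrip l = [] then
      if b && nSL rest then specF b rest else l :: specF b rest
    else l :: specF (pvLastLower (pvStrip l)) rest

theorem specF_indep (l : List String) : ∀ b, nSL l = false → specF b l = specF false l := by
  induction l with
  | nil => intro b _; rfl
  | cons x rest ih =>
    intro b h
    by_cases hb : pvStrip x = []
    · simp only [nSL, hb, if_true] at h
      simp [specF, hb, h, ih b h]
    · simp [specF, hb]

theorem specF_dropBlank (l : List String) : nSL l = true → specF true l = specF false (l.drop (blankLen l)) := by
  induction l with
  | nil => intro h; simp [nSL] at h
  | cons x rest ih =>
    intro h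
    by_cases hb : pvStrip x = []
    · simp only [nSL, hb, if_true] at h
      simp [specF, blankLen, hb, h, ih h]
    · simp [specF, blankLen, hb]

theorem inner_char (text : List String) :
    ∀ n j i, text.length - j ≤ n → i < j →
      innerScan text i j =
        if nSL (text.drop j) then j + blankLen (text.drop j) - 1 else i := by
  intro n
  induction n with
  | zero =>
    intro j i hn _
    have hj : ¬ j < text.length := by omega
    rw [innerScan]
    simp [hj, List.drop_eq_nil_of_le (by omega : text.length ≤ j), nSL]
  | succ n ih =>
    intro j i hn hij
    by_cases hj : j < text.length
    · rw [innerScan]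
      simp only [dif_pos hj]
      rw [List.drop_eq_getElem_cons hj]
      by_cases hb : pvStrip text[j] = []
      · rw [if_neg (by simp [hb])]
        rw [ih (j + 1) i (by omega) (by omega)]
        simp [nSL, blankLen, hb]
      · rw [if_pos (by simp [hb])]
        simp [nSL, blankLen, hb]
        all_goals try split_ifs
        all_goals omega
    · rw [innerScan]
      simp [hj, List.drop_eq_nil_of_le (by omega : text.length ≤ j), nSL]

theorem out_eq (text : List String) :
    ∀ n i result, text.length - i ≤ n →
      outerLoop text i result = result ++ specF false (text.drop i) := by
  intro n
  induction n with
  | zero =>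
    intro i result hn
    have hi : ¬ i < text.length := by omega
    rw [outerLoop]
    simp [hi, List.drop_eq_nil_of_le (by omega : text.length ≤ i), specF]
  | succ n ih =>
    intro i result hn
    by_cases hi : i < text.length
    · rw [outerLoop]
      simp only [dif_pos hi]
      rw [List.drop_eq_getElem_cons hi]
      by_cases hb : pvStrip text[i] = []
      · -- blank line: kept (b = false), i unchanged
        rw [if_neg (by simp [hb])]
        rw [ih (i + 1) (result ++ [text[i]]) (by omega)]
        simp [specF, hb]
      · by_cases hl : pvLastLower (pvStrip text[i]) = true
        · -- non-blank line ending lowercase: inner look-ahead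
          rw [if_pos ⟨hb, hl⟩]
          rw [inner_char text (n + 1) (i + 1) i (by omega) (by omega)]
          by_cases hs : nSL (text.drop (i + 1)) = true
          · -- following non-blank starts lowercase: the blank run is skipped
            rw [if_pos hs]
            have hk : i + 1 + blankLen (text.drop (i + 1)) - 1 + 1
                = i + 1 + blankLen (text.drop (i + 1)) := by omega
            rw [hk, ih (i + 1 + blankLen (text.drop (i + 1))) (result ++ [text[i]]) (by omega)]
            have hd : text.drop (i + 1 + blankLen (text.drop (i + 1)))
                = (text.drop (i + 1)).drop (blankLen (text.drop (i + 1))) := by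
              rw [List.drop_drop]
            rw [hd, ← specF_dropBlank _ hs]
            simp [specF, hb, hl]
          · -- no following lowercase start: nothing skipped
            rw [if_neg hs]
            rw [ih (i + 1) (result ++ [text[i]]) (by omega)]
            simp only [specF, if_neg hb, hl]
            rw [specF_indep _ true (by simpa using hs)]
            simp
        · -- non-blank line not ending lowercase
          rw [if_neg (by tauto)]
          rw [ih (i + 1) (result ++ [text[i]]) (by omega)]
          simp only [specF, if_neg hb]
          rw [eq_false_of_ne_true hl]
          simp
    · rw [outerLoop]
      simp [hi, List.drop_eq_nil_of_le (by omega : text.length ≤ i), specF]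

theorem foldl_spec (l : List String) :
    ∀ res pend b,
      (l.foldl altStep (res, pend, b)).1 ++ (l.foldl altStep (res, pend, b)).2.1
        = res ++ (if b && nSL l && !pend.isEmpty then [] else pend) ++ specF b l := by
  induction l with
  | nil => intro res pend b; simp [nSL, specF]
  | cons x rest ih =>
    intro res pend b
    by_cases hb : pvStrip x = []
    · simp only [List.foldl_cons, altStep, hb, if_true]
      rw [ih]
      simp only [nSL, specF, hb, if_true]
      by_cases hs : (b && nSL rest) = true
      · cases pend <;> simp [hs]
      · simp only [Bool.and_eq_true] at *
        cases pend <;> simp [hs, List.append_assoc]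
    · simp only [List.foldl_cons, altStep, hb]
      by_cases hc : (b && pvFirstLower (pvStrip x) && !pend.isEmpty) = true
      · simp only [hc, if_true]
        rw [ih]
        simp [nSL, specF, hb, hc]
      · simp only [hc, if_false]
        rw [ih]
        simp only [nSL, specF, hb]
        simp [hc, List.append_assoc]

-- ===== VERDICT (by name: the statement is the Claim_ definition above) =====
theorem adjust_broken_spec : Claim_equal_adjust_broken := by
  intro text _
  unfold Spec_adjust_broken adjust_broken adjust_broken_alt
  rw [out_eq text text.length 0 [] (by omega)]
  have h := foldl_spec text [] [] false
  simp only [Bool.false_and] at h ⊢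
  rw [h]
  simp
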